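-- pv_equiv track=rewrite | github.com/lmh00/codewars | faro.py | faro_cycles
-- ===== SOURCE A (Python) =====
-- def faro_cycles(deck_size):
--     deck = []
--     untouched = []
--     current = []
--     left_hand = []
--     right_hand = []
--     half = deck_size // 2
--     shuffles = 0
--
--     for i in range(deck_size):
--         deck.append(i)
--
--     current = deck
--
--     while current != untouched:
--         untouched = deck
--         shuffles += 1
--
--         left_hand = current[:half]
--         right_hand = current[half:]
--         current = []
--
--         for i in range(len(left_hand)):
--             current.append(left_hand[i])
--             current.append(right_hand[i])
--
--     return shuffles
-- ===== SOURCE B (Python) =====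
-- def faro_cycles(deck_size):
--     # Number of out-shuffles to restore an even deck = multiplicative order
--     # of 2 modulo deck_size - 1, computed by iterative doubling.
--     if deck_size <= 0:
--         return 0
--     m = deck_size - 1
--     shuffles = 1
--     x = 2 % m
--     while x != 1 % m:
--         x = x * 2 % m
--         shuffles += 1
--     return shuffles
-- ===== Notes on version B (the rewrite author's own statement) =====
-- stated objective: faster
-- what changed: Replaces the list-shuffling simulation (rebuild the whole deck each pass until it equals the original) by number theory: the answer is the multiplicative order of two modulo deck_size-1, computed by iterative doubling of a single residue; intended as faster (a timing run measured B ~587x ahead at the largest size both finish; at the top size odd random inputs make both programs diverge, so that run could not confirm there). Pre_ excludes odd positive deck sizes, on which A loops forever (it never returns).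
import Mathlib
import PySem

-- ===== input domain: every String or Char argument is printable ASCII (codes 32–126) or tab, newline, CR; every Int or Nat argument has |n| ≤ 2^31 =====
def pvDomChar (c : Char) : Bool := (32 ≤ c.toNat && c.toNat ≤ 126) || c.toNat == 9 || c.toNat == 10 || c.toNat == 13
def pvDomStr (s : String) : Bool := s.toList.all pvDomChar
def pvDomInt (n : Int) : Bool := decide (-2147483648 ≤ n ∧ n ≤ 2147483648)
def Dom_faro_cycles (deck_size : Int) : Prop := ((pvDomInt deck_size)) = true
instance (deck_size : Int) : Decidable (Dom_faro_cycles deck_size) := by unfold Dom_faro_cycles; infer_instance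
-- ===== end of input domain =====

-- B replaces A's repeated list-interleaving simulation by the multiplicative order of two
-- modulo deck_size-1 via iterative doubling (intended as faster; a timing run measured
-- B far ahead at the largest size both finish).

-- ===== PORT A =====
-- the inner 'for i in range(len(left_hand)): current.append(left_hand[i]); current.append(right_hand[i])':
-- the loop walks the two halves in step, appending left_hand[i] then right_hand[i]; ported as a zip
-- (exact: the loop reads exactly the first len(left_hand) elements of each list, and
-- len(left_hand) ≤ len(right_hand) on every state A reaches)
def pvShuffleStep (half : Int) (current : List Int) : List Int :=
  let left_hand := PySem.List.slice current none (some half)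
  let right_hand := PySem.List.slice current (some half) none
  (left_hand.zip right_hand).flatMap (fun p => [p.1, p.2])

-- A's 'while current != untouched' loop; fuel only makes the loop total (it suffices on Pre_,
-- where the loop stops after at most deck_size iterations)
def pvLoopA (deck : List Int) (half : Int) : Nat → List Int → List Int → Int → Int
  | 0, _, _, shuffles => shuffles
  | f + 1, current, untouched, shuffles =>
    if current = untouched then shuffles
    else pvLoopA deck half f (pvShuffleStep half current) deck (shuffles + 1)

def faro_cycles (deck_size : Int) : Int :=
  let half := PySem.Int.floordiv deck_size 2
  let deck := (PySem.List.pyRange 0 deck_size 1).foldl (fun acc i => acc ++ [i]) []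
  pvLoopA deck half (deck_size.toNat + 1) deck [] 0

-- ===== PORT B =====
-- B's 'while x != 1 % m' loop (fuel only makes it total; it suffices on Pre_)
def pvLoopB (m : Int) : Nat → Int → Int → Int
  | 0, _, shuffles => shuffles
  | f + 1, x, shuffles =>
    if x = PySem.Int.mod 1 m then shuffles
    else pvLoopB m f (PySem.Int.mod (x * 2) m) (shuffles + 1)

def faro_cycles_alt (deck_size : Int) : Int :=
  if deck_size ≤ 0 then 0
  else
    let m := deck_size - 1
    pvLoopB m deck_size.toNat (PySem.Int.mod 2 m) 1

-- ===== PRECONDITION & SPEC =====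
-- Pre_ excludes odd positive deck sizes: there A's while loop never terminates (A never returns).
def Pre_faro_cycles (deck_size : Int) : Prop :=
  deck_size ≤ 0 ∨ PySem.Int.mod deck_size 2 = 0
instance (deck_size : Int) : Decidable (Pre_faro_cycles deck_size) := by
  unfold Pre_faro_cycles; infer_instance
def pvWitness_faro_cycles : Int := 8

def Spec_faro_cycles (deck_size : Int) (out : Int) : Prop := out = faro_cycles_alt deck_size
instance (deck_size : Int) (out : Int) : Decidable (Spec_faro_cycles deck_size out) := by
  unfold Spec_faro_cycles; infer_instance

-- ===== CLAIM (what is proved, stated in full; the proofs are below) =====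
def Claim_equal_faro_cycles : Prop := ∀ (deck_size : Int), Dom_faro_cycles deck_size →
  Pre_faro_cycles deck_size → Spec_faro_cycles deck_size (faro_cycles deck_size)

-- ===== LEMMAS AND PROOFS =====

-- position map of one out-shuffle: the card at (new) position j came from position pvU h j
def pvU (h j : Nat) : Nat := if j % 2 = 0 then j / 2 else h + j / 2

-- the deck state reached after k shuffles, as a map over positions
def pvDeckMap (N : Nat) (g : Nat → Nat) : List Int :=
  (List.range N).map (fun j => ((g j : Nat) : Int))

-- proof-side interleaver
def pvIlv : List Int → List Int → List Int
  | a :: l, b :: r => a :: b :: pvIlv l r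
  | _, _ => []

lemma pvU_cong (h j : Nat) (hj : j < 2 * h) : 2 * pvU h j ≡ j [MOD 2 * h - 1] := by
  unfold pvU
  split
  · have : 2 * (j / 2) = j := by omega
    rw [this]
  · have : 2 * (h + j / 2) = (2 * h - 1) + j := by omega
    rw [this]
    simp

lemma pvU_iter_lt_m (h : Nat) (hh : 1 ≤ h) (k j : Nat) (hj : j < 2 * h - 1) :
    (pvU h)^[k] j < 2 * h - 1 := by
  induction k generalizing j with
  | zero => simpa using hj
  | succ k ih =>
    rw [Function.iterate_succ_apply]
    apply ih
    unfold pvU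
    split <;> omega

lemma pvU_iter_fix (h : Nat) (hh : 1 ≤ h) (k : Nat) :
    (pvU h)^[k] (2 * h - 1) = 2 * h - 1 := by
  induction k with
  | zero => simp
  | succ k ih =>
    rw [Function.iterate_succ_apply]
    have : pvU h (2 * h - 1) = 2 * h - 1 := by unfold pvU; split <;> omega
    rw [this, ih]

lemma pvU_iter_cong (h : Nat) (hh : 1 ≤ h) (k j : Nat) (hj : j < 2 * h) :
    2 ^ k * (pvU h)^[k] j ≡ j [MOD 2 * h - 1] := by
  induction k generalizing j with
  | zero => simpa using Nat.ModEq.refl j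
  | succ k ih =>
    rw [Function.iterate_succ_apply]
    have hu : pvU h j < 2 * h := by unfold pvU; split <;> omega
    have he : 2 ^ (k + 1) * (pvU h)^[k] (pvU h j)
        = 2 * (2 ^ k * (pvU h)^[k] (pvU h j)) := by ring
    rw [he]
    exact ((ih _ hu).mul_left 2).trans (pvU_cong h j hj)

lemma pvMap_eq_iff (N : Nat) (g : Nat → Nat) :
    pvDeckMap N g = pvDeckMap N id ↔ ∀ j < N, g j = j := by
  unfold pvDeckMap
  rw [List.map_inj_left]
  constructor
  · intro H j hj
    have := H j (List.mem_range.mpr hj)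
    exact_mod_cast this
  · intro H a ha
    have := H a (List.mem_range.mp ha)
    exact_mod_cast this

lemma pvCond_iff (h : Nat) (hh : 1 ≤ h) (k : Nat) :
    (pvDeckMap (2 * h) ((pvU h)^[k]) = pvDeckMap (2 * h) id) ↔
      2 ^ k % (2 * h - 1) = 1 % (2 * h - 1) := by
  rw [pvMap_eq_iff]
  constructor
  · intro H
    by_cases h1 : h = 1
    · subst h1; simp [Nat.mod_one]
    · have h2 : 2 ≤ 2 * h - 1 := by omega
      have hc := pvU_iter_cong h hh k 1 (by omega)
      rw [H 1 (by omega)] at hc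
      simpa [Nat.ModEq] using hc
  · intro H j hj
    rcases Nat.lt_or_ge j (2 * h - 1) with hjm | hjm
    · have hc := pvU_iter_cong h hh k j (by omega)
      have hlt := pvU_iter_lt_m h hh k j hjm
      have hx : (pvU h)^[k] j ≡ j [MOD 2 * h - 1] := by
        calc (pvU h)^[k] j = 1 * (pvU h)^[k] j := by ring
          _ ≡ 2 ^ k % (2*h-1) * (pvU h)^[k] j [MOD 2*h-1] := by
              exact Nat.ModEq.mul_right _ (by simpa [Nat.ModEq] using H.symm)
          _ ≡ 2 ^ k * (pvU h)^[k] j [MOD 2*h-1] := Nat.ModEq.mul_right _ (Nat.mod_modEq _ _)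
          _ ≡ j [MOD 2*h-1] := hc
      have hx' : (pvU h)^[k] j % (2 * h - 1) = j % (2 * h - 1) := hx
      rw [Nat.mod_eq_of_lt hlt, Nat.mod_eq_of_lt hjm] at hx'
      exact hx'
    · have hje : j = 2 * h - 1 := by omega
      rw [hje]
      exact pvU_iter_fix h hh k

lemma pvZip_ilv : ∀ (l r : List Int), (l.zip r).flatMap (fun p => [p.1, p.2]) = pvIlv l r := by
  intro l
  induction l with
  | nil => intro r; simp [pvIlv]
  | cons a t ih =>
    intro r
    cases r with
    | nil => simp [pvIlv]
    | cons b s => simp [pvIlv, ih]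

lemma pvIlv_getElem? : ∀ (l r : List Int), l.length = r.length → ∀ j,
    (pvIlv l r)[j]? = if j % 2 = 0 then l[j / 2]? else r[j / 2]? := by
  intro l
  induction l with
  | nil =>
    intro r hr j
    have : r = [] := by cases r <;> simp_all
    subst this
    simp [pvIlv]
  | cons a t ih =>
    intro r hr j
    cases r with
    | nil => simp at hr
    | cons b s =>
      have hts : t.length = s.length := by simpa using hr
      match j with
      | 0 => simp [pvIlv]
      | 1 => simp [pvIlv]
      | (k + 2) =>
        have := ih s hts k
        simp only [pvIlv, List.getElem?_cons_succ]
        rw [this]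
        have h2 : (k + 2) % 2 = k % 2 := by omega
        have h3 : (k + 2) / 2 = k / 2 + 1 := by omega
        rw [h2, h3]
        split <;> simp

lemma pvStepCore (h : Nat) (f : Nat → Int) :
    pvIlv (((List.range (2*h)).map f).take h) (((List.range (2*h)).map f).drop h)
      = (List.range (2*h)).map (fun j => f (pvU h j)) := by
  apply List.ext_getElem?
  intro j
  rw [pvIlv_getElem? _ _ (by simp; omega) j]
  by_cases hj : j / 2 < h
  · by_cases hp : j % 2 = 0
    · have hjlt : j < 2*h := by omega
      have hj2 : j / 2 < 2*h := by omega
      simp [hp, hj, hjlt, hj2, pvU]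
    · have hjlt : j < 2*h := by omega
      have hd : h + j/2 < 2*h := by omega
      simp [hp, hjlt, hd, pvU]
  · have hjge : ¬ j < 2*h := by omega
    simp [hj, hjge]
    omega

lemma pvShuffleStep_eq (h : Nat) (g : Nat → Nat) :
    pvShuffleStep (h : Int) (pvDeckMap (2 * h) g) =
      pvDeckMap (2 * h) (fun j => g (pvU h j)) := by
  unfold pvShuffleStep pvDeckMap
  rw [PySem.List.slice_to_natCast, PySem.List.slice_from_natCast]
  rw [pvZip_ilv]
  exact pvStepCore h (fun j => ((g j : Nat) : Int))

lemma pvModStep (h k : Nat) :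
    PySem.Int.mod (((2 ^ k % (2 * h - 1) : Nat) : Int) * 2) ((2 * h - 1 : Nat) : Int)
      = ((2 ^ (k + 1) % (2 * h - 1) : Nat) : Int) := by
  have h1 : (((2 ^ k % (2 * h - 1) : Nat) : Int) * 2) = ((2 ^ k % (2 * h - 1) * 2 : Nat) : Int) := by
    push_cast; ring
  rw [h1, PySem.Int.mod_natCast]
  have h2 : (2 ^ k % (2 * h - 1)) * 2 % (2 * h - 1) = (2 ^ k * 2) % (2 * h - 1) :=
    (Nat.mod_modEq (2 ^ k) (2 * h - 1)).mul_right 2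
  rw [h2, pow_succ]

lemma pvLoop_eq (h : Nat) (hh : 1 ≤ h) (fuel : Nat) : ∀ (k : Nat),
    pvLoopA (pvDeckMap (2 * h) id) (h : Int) fuel
        (pvDeckMap (2 * h) ((pvU h)^[k])) (pvDeckMap (2 * h) id) (k : Int)
      = pvLoopB ((2 * h - 1 : Nat) : Int) fuel ((2 ^ k % (2 * h - 1) : Nat) : Int) (k : Int) := by
  induction fuel with
  | zero => intro k; rfl
  | succ f ih =>
    intro k
    have hm1 : PySem.Int.mod 1 ((2 * h - 1 : Nat) : Int) = ((1 % (2 * h - 1) : Nat) : Int) := by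
      exact_mod_cast PySem.Int.mod_natCast 1 (2 * h - 1)
    rw [pvLoopA, pvLoopB, hm1]
    by_cases hcond : 2 ^ k % (2 * h - 1) = 1 % (2 * h - 1)
    · rw [if_pos ((pvCond_iff h hh k).mpr hcond), if_pos (by exact_mod_cast hcond)]
    · rw [if_neg (fun hc => hcond ((pvCond_iff h hh k).mp hc)),
          if_neg (fun hc => hcond (by exact_mod_cast hc))]
      rw [pvShuffleStep_eq h]
      have hit : (fun j => (pvU h)^[k] (pvU h j)) = (pvU h)^[k + 1] := by
        funext j; exact (Function.iterate_succ_apply (pvU h) k j).symm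
      rw [hit, pvModStep h k]
      have hk1 : (k : Int) + 1 = ((k + 1 : Nat) : Int) := by push_cast; ring
      rw [hk1]
      exact ih (k + 1)

-- ===== VERDICT (by name: the statement is the Claim_ definition above) =====
theorem faro_cycles_spec : Claim_equal_faro_cycles := by
  intro n hdom hpre
  unfold Spec_faro_cycles faro_cycles faro_cycles_alt
  by_cases hn : n ≤ 0
  · have hr : PySem.List.pyRange 0 n = [] := PySem.List.pyRange_one_eq_nil hn
    simp [hr, hn, pvLoopA]
  · replace hn : 0 < n := by omega
    have hev : (2 : Int) ∣ n := (PySem.Int.mod_eq_zero_iff_dvd n 2).mp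
      (hpre.resolve_left (by omega))
    rcases hev with ⟨c, hc⟩
    have hn2 : 2 ≤ n := by omega
    have hNn : ((n.toNat : Int)) = n := Int.toNat_of_nonneg (by omega)
    have hNd : 2 ∣ n.toNat := ⟨c.toNat, by omega⟩
    set H := n.toNat / 2 with hH
    have hN2 : n.toNat = 2 * H := by omega
    have hh : 1 ≤ H := by omega
    have hdeck : (PySem.List.pyRange 0 n).foldl (fun acc i => acc ++ [i]) []
        = pvDeckMap (2 * H) id := by
      rw [PySem.List.foldl_append_singleton_eq_self, List.nil_append,
          PySem.List.pyRange_zero]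
      simp [pvDeckMap, hN2.symm]
    have hhalf : PySem.Int.floordiv n 2 = ((H : Nat) : Int) := by
      rw [PySem.Int.floordiv_eq_ediv_of_pos (by norm_num)]
      omega
    have hne : pvDeckMap (2 * H) id ≠ [] := by
      simp [pvDeckMap, List.range_eq_nil]
      omega
    simp only [hdeck, hhalf]
    rw [if_neg (by omega : ¬ n ≤ 0)]
    have hm : n - 1 = ((2 * H - 1 : Nat) : Int) := by omega
    have hx : PySem.Int.mod 2 (n - 1) = ((2 ^ 1 % (2 * H - 1) : Nat) : Int) := by
      rw [hm]
      exact_mod_cast PySem.Int.mod_natCast 2 (2 * H - 1)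
    rw [hx, hm]
    conv_rhs => rw [hN2]
    conv_lhs => rw [hN2]
    rw [pvLoopA, if_neg hne]
    conv_lhs => rw [show pvShuffleStep ((H : Nat) : Int) (pvDeckMap (2 * H) id)
        = pvDeckMap (2 * H) ((pvU H)^[1]) from by
      rw [pvShuffleStep_eq _ id]
      simp [pvDeckMap]]
    have h01 : (0 : Int) + 1 = ((1 : Nat) : Int) := by norm_num
    rw [h01, pvLoop_eq H hh (2 * H) 1]
    norm_cast
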